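-- pv_equiv track=rewrite | github.com/arquivo/replay-cdxj-indexing-tools | replay_cdxj_indexing_tools/search/filters.py | normalize_timestamp
-- ===== SOURCE A (Python) =====
-- def normalize_timestamp(timestamp: str) -> str:
--     """
--     Normalize flexible timestamp to 14-digit format.
--
--     Args:
--         timestamp: Timestamp in various formats (2020, 202001, 20200101, etc.)
--
--     Returns:
--         14-digit timestamp string padded appropriately
--
--     Examples:
--         "2020" -> "20200101000000"
--         "202012" -> "20201201000000"
--         "20201225" -> "20201225000000"
--     """
--     # Remove any non-digit characters
--     ts = "".join(c for c in timestamp if c.isdigit())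
--
--     # Pad to 14 digits with appropriate defaults
--     if len(ts) < 14:
--         # Default values for each position
--         # YYYY MM DD HH MM SS
--         # Pad month and day with 01, hours/minutes/seconds with 00
--         defaults = "00000101000000"
--
--         # Build the result by taking what we have and filling in defaults
--         result = list(defaults)
--         for i, char in enumerate(ts):
--             result[i] = char
--
--         ts = "".join(result)
--
--     return ts[:14]
-- ===== SOURCE B (Python) =====
-- def normalize_timestamp(timestamp: str) -> str:
--     """Simpler: truncate the digit string to 14 and append the matching tail of the defaults."""
--     ts = "".join(c for c in timestamp if c.isdigit())[:14]
--     return ts + "00000101000000"[len(ts):]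
-- ===== Notes on version B (the rewrite author's own statement) =====
-- stated objective: simpler
-- what changed: Replaces the mutable list overlay loop (copy defaults, assign each digit by index, rejoin) with a single slice-and-pad: truncate the digit string to 14 and concatenate the defaults tail from position len(ts).
import Mathlib
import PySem

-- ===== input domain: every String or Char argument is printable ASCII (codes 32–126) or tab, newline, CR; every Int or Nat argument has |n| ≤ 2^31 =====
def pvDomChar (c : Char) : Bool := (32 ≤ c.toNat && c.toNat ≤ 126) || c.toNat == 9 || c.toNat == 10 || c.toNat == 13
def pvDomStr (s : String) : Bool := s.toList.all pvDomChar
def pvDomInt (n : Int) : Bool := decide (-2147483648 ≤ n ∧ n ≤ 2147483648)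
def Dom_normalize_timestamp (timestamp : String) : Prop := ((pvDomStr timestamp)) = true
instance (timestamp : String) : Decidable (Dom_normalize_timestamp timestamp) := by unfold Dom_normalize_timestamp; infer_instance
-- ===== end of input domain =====

-- B replaces A's mutable list-overlay loop with one slice-and-pad concatenation (simpler decomposition, same cost).


-- ===== PORT A =====
def normalize_timestamp (timestamp : String) : String :=
  -- ts = "".join(c for c in timestamp if c.isdigit())
  let ts := timestamp.toList.filter PySem.Chars.isdigit
  let ts :=
    if ts.length < 14 then
      -- defaults = "00000101000000"; result = list(defaults); for i, char in enumerate(ts): result[i] = char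
      let defaults := "00000101000000".toList
      let result := (PySem.List.enumerate ts 0).foldl
        (fun r p => PySem.List.pySetD r p.1 p.2) defaults
      result
    else ts
  -- return ts[:14]
  String.ofList (PySem.List.slice ts none (some 14))

-- ===== PORT B =====
def normalize_timestamp_alt (timestamp : String) : String :=
  -- ts = "".join(c for c in timestamp if c.isdigit())[:14]
  let ts := PySem.List.slice (timestamp.toList.filter PySem.Chars.isdigit) none (some 14)
  -- return ts + "00000101000000"[len(ts):]
  String.ofList (ts ++ PySem.List.slice "00000101000000".toList (some (ts.length : Int)) none)

-- ===== PRECONDITION & SPEC =====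
def Spec_normalize_timestamp (timestamp : String) (out : String) : Prop := out = normalize_timestamp_alt timestamp
instance (timestamp : String) (out : String) : Decidable (Spec_normalize_timestamp timestamp out) := by unfold Spec_normalize_timestamp; infer_instance

-- ===== CLAIM (what is proved, stated in full; the proofs are below) =====
def Claim_equal_normalize_timestamp : Prop := ∀ (timestamp : String), Dom_normalize_timestamp timestamp → Spec_normalize_timestamp timestamp (normalize_timestamp timestamp)

-- ===== LEMMAS AND PROOFS =====

-- The overlay loop writes ts over the first |ts| positions of ds (starting at s).
theorem pv_overlay (ts : List Char) : ∀ (ds : List Char) (s : ℕ), ts.length + s ≤ ds.length →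
    (PySem.List.enumerate ts (s : Int)).foldl (fun r p => PySem.List.pySetD r p.1 p.2) ds
      = ds.take s ++ ts ++ ds.drop (s + ts.length) := by
  induction ts with
  | nil => intro ds s h; simp
  | cons c ts ih =>
    intro ds s h
    have hs : s < ds.length := by simp at h; omega
    have hcast : ((s : Int) + 1) = ((s + 1 : ℕ) : Int) := by push_cast; ring
    rw [PySem.List.enumerate_cons, List.foldl_cons, hcast]
    have hset : PySem.List.pySetD ds (s : Int) c = ds.set s c := by
      simp [PySem.List.pySetD_natCast]
    rw [hset, ih (ds.set s c) (s + 1) (by simp; simp at h; omega)]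
    rw [List.set_eq_take_append_cons_drop, if_pos hs]
    have h1 : ((ds.take s ++ c :: ds.drop (s + 1)).take (s + 1)) = ds.take s ++ [c] := by
      rw [List.take_append]
      simp [List.length_take, Nat.min_eq_left (le_of_lt hs)]
    have h2 : ((ds.take s ++ c :: ds.drop (s + 1)).drop (s + 1 + ts.length)) = ds.drop (s + 1 + ts.length) := by
      rw [List.drop_append]
      have hl : (ds.take s).length = s := List.length_take_of_le (le_of_lt hs)
      rw [hl]
      have : s + 1 + ts.length - s = 1 + ts.length := by omega
      rw [this]
      have hd : (ds.take s).drop (s + 1 + ts.length) = [] := by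
        apply List.drop_eq_nil_of_le; rw [hl]; omega
      rw [hd, List.nil_append, Nat.add_comm 1 ts.length, List.drop_succ_cons, List.drop_drop]
    rw [h1, h2]
    simp [List.append_assoc]
    omega

theorem pv_normalize_alt_eq (timestamp : String) :
    normalize_timestamp timestamp = normalize_timestamp_alt timestamp := by
  unfold normalize_timestamp normalize_timestamp_alt
  dsimp only
  set f := timestamp.toList.filter PySem.Chars.isdigit with hf
  rw [PySem.List.slice_from_natCast]
  by_cases h : f.length < 14
  · rw [if_pos h]
    have hov := pv_overlay f "00000101000000".toList 0 (by simp; omega)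
    simp only [Nat.cast_zero] at hov
    rw [hov]
    simp only [List.take_zero, List.nil_append, Nat.zero_add]
    have hsl : PySem.List.slice f none (some 14) = f := by
      rw [show (14 : Int) = ((14 : ℕ) : Int) by norm_num, PySem.List.slice_to_natCast]
      exact List.take_of_length_le (le_of_lt h)
    rw [hsl]
    rw [show (14 : Int) = ((14 : ℕ) : Int) by norm_num, PySem.List.slice_to_natCast]
    congr 1
    apply List.take_of_length_le
    simp
    omega
  · rw [if_neg h]
    rw [Nat.not_lt] at h
    rw [show (14 : Int) = ((14 : ℕ) : Int) by norm_num, PySem.List.slice_to_natCast]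
    have hlen : (f.take 14).length = 14 := by simp [Nat.min_eq_left h]
    rw [hlen, List.drop_of_length_le (by simp), List.append_nil]

-- ===== VERDICT (by name: the statement is the Claim_ definition above) =====
theorem normalize_timestamp_spec : Claim_equal_normalize_timestamp := by
  intro t _
  unfold Spec_normalize_timestamp
  exact pv_normalize_alt_eq t
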